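-- pv_equiv track=rewrite | github.com/huangweijing/weo_leetcode | 2433_Find_The_Original_Array_of_Prefix_Xor.py | findArray
-- ===== SOURCE A (Python) =====
-- from typing import List
--
-- def findArray(pref: List[int]) -> List[int]:
--     result = []
--     xor_sum = 0
--     for num in pref:
--         pre = xor_sum ^ num
--         result.append(pre)
--         xor_sum = xor_sum ^ pre
--     return result
-- ===== SOURCE B (Python) =====
-- from typing import List
--
-- def findArray(pref: List[int]) -> List[int]:
--     # In-place on a copy, traversed BACK TO FRONT: when index i is processed,
--     # positions below i still hold the original prefix values, so
--     # arr[i-1] ^ arr[i] is exactly original[i] of the recovered array.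
--     arr = list(pref)
--     for i in range(len(arr) - 1, 0, -1):
--         arr[i] = arr[i - 1] ^ arr[i]
--     return arr
-- ===== Notes on version B (the rewrite author's own statement) =====
-- stated objective: alternative
-- what changed: B drops A's forward accumulator-and-append loop entirely: it copies the input and mutates the copy in place, traversing indices BACKWARDS (range(n-1,0,-1)) and replacing arr[i] with arr[i]^arr[i-1]; no running xor_sum and no output list is built.
import Mathlib
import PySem

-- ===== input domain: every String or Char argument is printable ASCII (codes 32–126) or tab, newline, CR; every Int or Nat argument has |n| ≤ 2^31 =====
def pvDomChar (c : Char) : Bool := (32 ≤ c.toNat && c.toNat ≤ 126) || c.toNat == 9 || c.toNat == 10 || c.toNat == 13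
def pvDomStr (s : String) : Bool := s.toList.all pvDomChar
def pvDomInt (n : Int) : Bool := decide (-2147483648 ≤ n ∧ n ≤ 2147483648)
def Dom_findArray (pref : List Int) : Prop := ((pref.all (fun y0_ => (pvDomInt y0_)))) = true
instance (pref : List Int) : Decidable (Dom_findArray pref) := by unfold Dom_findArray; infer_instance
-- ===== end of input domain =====

-- B replaces A's forward accumulator-and-append loop by a backwards in-place
-- index loop on a copy of the input (objective: alternative; return value only —
-- B mutates only its own copy, like A).

-- ===== PORT A =====
def findArray (pref : List Int) : List Int :=
  (pref.foldl (fun (st : List Int × Int) num =>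
      let pre := PySem.Int.bxor st.2 num
      (st.1 ++ [pre], PySem.Int.bxor st.2 pre)) ([], 0)).1

-- ===== PORT B =====
-- every i drawn from range(len-1, 0, -1) is in range, so pyGetD/List.set are exact here
def findArray_alt (pref : List Int) : List Int :=
  (PySem.List.pyRange ((pref.length : Int) - 1) 0 (-1)).foldl
    (fun arr i =>
      arr.set i.toNat (PySem.Int.bxor (PySem.List.pyGetD arr (i - 1) 0) (PySem.List.pyGetD arr i 0)))
    pref

-- ===== PRECONDITION & SPEC =====
def Spec_findArray (pref : List Int) (out : List Int) : Prop := out = findArray_alt pref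
instance (pref : List Int) (out : List Int) : Decidable (Spec_findArray pref out) := by unfold Spec_findArray; infer_instance

-- ===== CLAIM (what is proved, stated in full; the proofs are below) =====
def Claim_equal_findArray : Prop := ∀ (pref : List Int), Dom_findArray pref → Spec_findArray pref (findArray pref)

-- ===== LEMMAS AND PROOFS =====

-- the tail of the recovered array, from position k+1 on: pref[k]^pref[k+1], …
def pvG (pref : List Int) (k : Nat) : List Int :=
  (List.zip (pref.drop k) (pref.drop (k+1))).map (fun p => PySem.Int.bxor p.1 p.2)

theorem nat_xor_cancel (a b : Nat) : a ^^^ (a ^^^ b) = b := by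
  rw [← Nat.xor_assoc, Nat.xor_self, Nat.zero_xor]

theorem bxor_cancel (s n : Int) : PySem.Int.bxor s (PySem.Int.bxor s n) = n := by
  unfold PySem.Int.bxor
  by_cases hs : (0:Int) ≤ s <;> by_cases hn : (0:Int) ≤ n
  · simp only [if_pos hs, if_pos hn, if_pos (Int.natCast_nonneg (s.toNat ^^^ n.toNat)),
      Int.toNat_natCast, nat_xor_cancel]
    exact Int.toNat_of_nonneg hn
  · simp only [if_pos hs, if_neg hn]
    have h1 : ¬ (0:Int) ≤ -↑(s.toNat ^^^ (-n - 1).toNat) - 1 := by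
      have := Int.natCast_nonneg (s.toNat ^^^ (-n - 1).toNat); omega
    rw [if_neg h1]
    have h2 : (-(-↑(s.toNat ^^^ (-n - 1).toNat) - 1) - 1 : Int) = ↑(s.toNat ^^^ (-n - 1).toNat) := by ring
    rw [h2, Int.toNat_natCast, nat_xor_cancel]
    omega
  · simp only [if_neg hs, if_pos hn]
    have h1 : ¬ (0:Int) ≤ -↑((-s - 1).toNat ^^^ n.toNat) - 1 := by
      have := Int.natCast_nonneg ((-s - 1).toNat ^^^ n.toNat); omega
    rw [if_neg h1]
    have h2 : (-(-↑((-s - 1).toNat ^^^ n.toNat) - 1) - 1 : Int) = ↑((-s - 1).toNat ^^^ n.toNat) := by ring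
    rw [h2, Int.toNat_natCast, nat_xor_cancel]
    omega
  · simp only [if_neg hs, if_neg hn,
      if_pos (Int.natCast_nonneg ((-s - 1).toNat ^^^ (-n - 1).toNat)),
      Int.toNat_natCast, nat_xor_cancel]
    omega

theorem bxor_zero_left (n : Int) : PySem.Int.bxor 0 n = n := by
  unfold PySem.Int.bxor
  by_cases hn : (0:Int) ≤ n
  · simp [if_pos hn, Int.toNat_of_nonneg hn]
  · simp only [le_refl, if_pos, if_neg hn, Int.toNat_zero, Nat.zero_xor]
    omega

-- A's loop builds exactly the adjacent-XOR list
theorem findArray_loop (pref : List Int) (res : List Int) (s : Int) :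
    (pref.foldl (fun (st : List Int × Int) num =>
      let pre := PySem.Int.bxor st.2 num
      (st.1 ++ [pre], PySem.Int.bxor st.2 pre)) (res, s)).1
    = res ++ (List.zip (s :: pref) pref).map (fun p => PySem.Int.bxor p.1 p.2) := by
  induction pref generalizing res s with
  | nil => simp
  | cons num rest ih =>
    simp only [List.foldl_cons, List.zip_cons_cons, List.map_cons]
    rw [ih, bxor_cancel]
    simp

-- one backward step of B's loop
theorem alt_step (pref : List Int) (j : Nat) (h1 : 1 ≤ j) (h2 : j < pref.length) :
    (pref.take (j+1) ++ pvG pref j).set ((j : Nat) : Int).toNat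
      (PySem.Int.bxor (PySem.List.pyGetD (pref.take (j+1) ++ pvG pref j) (((j : Nat) : Int) - 1) 0)
        (PySem.List.pyGetD (pref.take (j+1) ++ pvG pref j) ((j : Nat) : Int) 0))
    = pref.take j ++ pvG pref (j-1) := by
  have hlenT : (pref.take (j+1)).length = j + 1 := by
    simp [List.length_take]; omega
  have hlen : j < (pref.take (j+1) ++ pvG pref j).length := by
    simp only [List.length_append, hlenT]; omega
  have hgj : (pref.take (j+1) ++ pvG pref j)[j]'hlen = pref[j]'h2 := by
    rw [List.getElem_append_left (by omega)]
    exact List.getElem_take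
  have hlen' : j - 1 < (pref.take (j+1) ++ pvG pref j).length := by omega
  have hgj1 : (pref.take (j+1) ++ pvG pref j)[j-1]'hlen' = pref[j-1]'(by omega) := by
    rw [List.getElem_append_left (by omega)]
    exact List.getElem_take
  have e1 : PySem.List.pyGetD (pref.take (j+1) ++ pvG pref j) ((j : Nat) : Int) 0 = pref[j]'h2 := by
    rw [PySem.List.pyGetD_eq_getElem _ _ (Int.natCast_nonneg j) (by exact_mod_cast hlen)]
    simpa using hgj
  have e2 : PySem.List.pyGetD (pref.take (j+1) ++ pvG pref j) (((j : Nat) : Int) - 1) 0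
      = pref[j-1]'(by omega) := by
    have hc : ((j : Nat) : Int) - 1 = ((j - 1 : Nat) : Int) := by omega
    rw [hc, PySem.List.pyGetD_eq_getElem _ _ (Int.natCast_nonneg (j-1)) (by exact_mod_cast hlen')]
    simpa using hgj1
  rw [e1, e2, Int.toNat_natCast]
  have htake : pref.take (j+1) = pref.take j ++ [pref[j]'h2] :=
    List.take_succ_eq_append_getElem h2
  have hlt : (pref.take j).length = j := by simp [List.length_take]; omega
  rw [htake, List.append_assoc,
    List.set_append_right _ _ (by rw [hlt] : (pref.take j).length ≤ j), hlt, Nat.sub_self]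
  congr 1
  rw [List.cons_append, List.set_cons_zero]
  show PySem.Int.bxor (pref[j-1]'(by omega)) (pref[j]'h2) :: pvG pref j = pvG pref (j-1)
  unfold pvG
  have hd1 : pref.drop (j-1) = pref[j-1]'(by omega) :: pref.drop j := by
    rw [List.drop_eq_getElem_cons (by omega : j - 1 < pref.length)]
    congr 2
    omega
  have hd2 : pref.drop j = pref[j]'h2 :: pref.drop (j+1) :=
    List.drop_eq_getElem_cons h2
  have hd3 : j - 1 + 1 = j := by omega
  rw [hd1, hd3, hd2, List.zip_cons_cons, List.map_cons]

-- B's backward fold, from index j down, finishes the whole recovered array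
theorem alt_fold (pref : List Int) (j : Nat) (hj : j < pref.length) :
    (PySem.List.pyRange ((j : Nat) : Int) 0 (-1)).foldl
      (fun arr i =>
        arr.set i.toNat (PySem.Int.bxor (PySem.List.pyGetD arr (i - 1) 0) (PySem.List.pyGetD arr i 0)))
      (pref.take (j+1) ++ pvG pref j)
    = pref.take 1 ++ pvG pref 0 := by
  induction j with
  | zero =>
    rw [PySem.List.pyRange_neg_one_eq_nil (by norm_num)]
    rfl
  | succ k ih =>
    rw [PySem.List.pyRange_neg_one_cons (by positivity)]
    rw [List.foldl_cons]
    rw [alt_step pref (k+1) (by omega) hj]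
    have hc : (((k+1 : Nat) : Int) - 1) = ((k : Nat) : Int) := by push_cast; ring
    rw [hc]
    have hs : k + 1 - 1 = k := by omega
    rw [hs]
    exact ih (by omega)

theorem findArray_eq_alt (pref : List Int) : findArray pref = findArray_alt pref := by
  cases pref with
  | nil =>
    simp [findArray, findArray_alt, PySem.List.pyRange_neg_one_eq_nil]
  | cons p0 rest =>
    unfold findArray findArray_alt
    rw [findArray_loop]
    have hn : ((p0 :: rest).length : Int) - 1 = ((rest.length : Nat) : Int) := by
      simp
    rw [hn]
    have hinit : (p0 :: rest).take (rest.length + 1) ++ pvG (p0 :: rest) rest.length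
        = p0 :: rest := by
      have ht : (p0 :: rest).take (rest.length + 1) = p0 :: rest := by
        apply List.take_of_length_le; simp
      have hg : pvG (p0 :: rest) rest.length = [] := by
        unfold pvG
        have : (p0 :: rest).drop (rest.length + 1) = [] := by
          apply List.drop_eq_nil_of_le; simp
        simp [this]
      rw [ht, hg, List.append_nil]
    conv_rhs => rw [← hinit]
    rw [alt_fold (p0 :: rest) rest.length (by simp)]
    simp only [List.nil_append, List.zip_cons_cons, List.map_cons, bxor_zero_left]
    unfold pvG
    simp

-- ===== VERDICT (by name: the statement is the Claim_ definition above) =====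
theorem findArray_spec : Claim_equal_findArray := by
  intro pref _
  unfold Spec_findArray
  exact findArray_eq_alt pref
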